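-- pv_equiv track=rewrite | github.com/raeez/chiral-bar-cobar | compute/tests/test_categorical_cg_typeA.py | _prefundamental_char_sl2
-- ===== SOURCE A (Python) =====
-- def _prefundamental_char_sl2(b, depth=20):
--     """
--     Character of L^-(b) for sl_2, truncated to depth.
--     ch(L^-(b)) = sum_{n>=0} q^{2n+1} / (prod_{k=1}^n (1-q^{2k}))
--     where q tracks the weight grading.
--
--     Returns dict: weight -> multiplicity.
--     """
--     # L^- for sl_2 has dim H_n = number of partitions into
--     # parts <= n (roughly), but for the character test we just
--     # need the total dimension at each weight
--     result = {}
--     # Weight of L^-(b) starts at hw = b and descends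
--     # At level n: weight = b - 2n, multiplicity = p(n)
--     # where p(n) = number of partitions of n
--     from functools import lru_cache
--
--     @lru_cache(maxsize=None)
--     def partitions(n):
--         if n == 0:
--             return 1
--         if n < 0:
--             return 0
--         total = 0
--         for k in range(1, n + 1):
--             total += partitions(n - k)
--         return total
--
--     for n in range(depth):
--         result[b - 2 * n] = partitions(n)
--     return result
-- ===== SOURCE B (Python) =====
-- def _prefundamental_char_sl2(b, depth=20):
--     """
--     Character of L^-(b) for sl_2, truncated to depth.
--     Same values as the recursive version: the multiplicity at level n is
--     the number of compositions of n, which satisfies p(0)=p(1)=1 and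
--     p(n+1)=2*p(n) for n>=1, so a single pass with a running doubling
--     replaces the quadratic recursive summation.
--     """
--     result = {}
--     cur = 1
--     n = 0
--     while n < depth:
--         result[b - 2 * n] = cur
--         if n >= 1:
--             cur *= 2
--         n += 1
--     return result
-- ===== Notes on version B (the rewrite author's own statement) =====
-- stated objective: faster
-- what changed: Replaces the memoized recursion partitions(n)=sum_{k=1..n}partitions(n-k) (a Theta(n) sum per level, Theta(depth^2) total) by a single pass that maintains the multiplicity as a running value doubled each level (p(0)=p(1)=1, p(n+1)=2*p(n)).
import Mathlib
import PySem

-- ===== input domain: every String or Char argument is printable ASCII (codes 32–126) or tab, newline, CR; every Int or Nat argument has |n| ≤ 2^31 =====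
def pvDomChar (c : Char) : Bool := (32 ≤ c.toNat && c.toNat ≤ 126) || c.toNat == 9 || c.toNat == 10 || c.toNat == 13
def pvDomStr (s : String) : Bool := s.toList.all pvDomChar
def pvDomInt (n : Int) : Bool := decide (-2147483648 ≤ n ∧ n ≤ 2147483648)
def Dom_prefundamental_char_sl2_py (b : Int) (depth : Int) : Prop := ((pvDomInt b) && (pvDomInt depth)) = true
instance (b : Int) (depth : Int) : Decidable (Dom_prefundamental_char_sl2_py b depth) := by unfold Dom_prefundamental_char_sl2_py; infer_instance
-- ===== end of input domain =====

-- B replaces A's quadratic memoized recursive partition summation by a one-pass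
-- running doubling of the multiplicity (objective: faster).

-- ===== PORT A =====
-- A's inner 'partitions(n)' is an lru_cache-memoized recursion; the cache is
-- modeled as a table of the already computed values partitions(n-1), …,
-- partitions(0) (newest first), threaded through the outer loop exactly as the
-- lru_cache persists across the loop's calls.  One call partitions(n):
--   n = 0      -> 1                                   (the 'if n == 0' branch)
--   otherwise  -> total = 0; for k in range(1, n+1): total += partitions(n-k)
--                 (partitions(n-k) for k = 1, …, n are the cached values,
--                  newest first — exactly the table's elements in order)
def pvStepA : List Int → List Int
  | [] => [1]
  | x :: t => ((x :: t).foldl (fun total y => total + y) 0) :: x :: t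

-- one iteration of 'for n in range(depth): result[b - 2*n] = partitions(n)':
-- extend the cache to cover n, then store its newest entry under b - 2*n
def pvStep (b : Int) (st : PySem.Dict Int Int × List Int) (n : Int) :
    PySem.Dict Int Int × List Int :=
  let t := pvStepA st.2
  (st.1.insert (b - 2 * n) (t.headD 0), t)

def prefundamental_char_sl2_py (b : Int) (depth : Int) : List (Int × Int) :=
  (((PySem.List.pyRange 0 depth 1).foldl (pvStep b)
      ((PySem.Dict.empty : PySem.Dict Int Int), ([] : List Int))).1).items

-- ===== PORT B =====
-- Source B's while-loop: fuel = number of remaining iterations (depth - n).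
def pvAltLoop (b : Int) : Nat → Int → Int → PySem.Dict Int Int → PySem.Dict Int Int
  | 0, _, _, acc => acc
  | f+1, n, cur, acc =>
      pvAltLoop b f (n + 1) (if 1 ≤ n then cur * 2 else cur)
        (acc.insert (b - 2 * n) cur)

def prefundamental_char_sl2_py_alt (b : Int) (depth : Int) : List (Int × Int) :=
  (pvAltLoop b depth.toNat 0 1 PySem.Dict.empty).items

-- ===== PRECONDITION & SPEC =====
def Spec_prefundamental_char_sl2_py (b : Int) (depth : Int) (out : List (Int × Int)) : Prop := out = prefundamental_char_sl2_py_alt b depth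
instance (b : Int) (depth : Int) (out : List (Int × Int)) : Decidable (Spec_prefundamental_char_sl2_py b depth out) := by unfold Spec_prefundamental_char_sl2_py; infer_instance

-- ===== CLAIM (what is proved, stated in full; the proofs are below) =====
def Claim_equal_prefundamental_char_sl2_py : Prop := ∀ (b : Int) (depth : Int), Dom_prefundamental_char_sl2_py b depth → Spec_prefundamental_char_sl2_py b depth (prefundamental_char_sl2_py b depth)

-- ===== LEMMAS AND PROOFS =====

-- the closed form of A's 'partitions': 1, 1, 2, 4, 8, …
def pvP (n : Nat) : Int := if n = 0 then 1 else 2 ^ (n - 1)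

-- the cache after the first n iterations: partitions(n-1), …, partitions(0)
def pvTable : Nat → List Int
  | 0 => []
  | n+1 => pvStepA (pvTable n)

theorem pvFoldlAdd (l : List Int) (a : Int) :
    l.foldl (fun total y => total + y) a = a + l.sum := by
  rw [PySem.List.foldl_add l (fun y => y) a, List.map_id']

theorem pvTable_succ : ∀ n : Nat,
    pvTable (n+1) = pvP n :: pvTable n ∧ (pvTable (n+1)).sum = 2 ^ n := by
  intro n
  induction n with
  | zero => exact ⟨rfl, rfl⟩
  | succ m ih =>
      have h1 : pvTable (m+2) = pvP (m+1) :: pvTable (m+1) := by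
        show pvStepA (pvTable (m+1)) = pvP (m+1) :: pvTable (m+1)
        rw [ih.1, pvStepA, pvFoldlAdd, ← ih.1, ih.2]
        have hp : pvP (m+1) = 2 ^ m := by simp [pvP]
        rw [hp, zero_add]
      refine ⟨h1, ?_⟩
      rw [h1, List.sum_cons, ih.2]
      have hp : pvP (m+1) = 2 ^ m := by simp [pvP]
      rw [hp]
      ring

theorem pvP_succ (s : Int) (hs : 0 ≤ s) :
    (if 1 ≤ s then pvP s.toNat * 2 else pvP s.toNat) = pvP (s.toNat + 1) := by
  split_ifs with h
  · obtain ⟨m, hm⟩ : ∃ m, s.toNat = m + 1 := ⟨s.toNat - 1, by omega⟩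
    rw [hm]
    simp [pvP, pow_succ]
  · have h0 : s.toNat = 0 := by omega
    rw [h0]
    rfl

theorem pvAB (b : Int) : ∀ (f : Nat) (s e : Int), 0 ≤ s → (e - s).toNat = f →
    ∀ (d : PySem.Dict Int Int),
    ((PySem.List.pyRange s e 1).foldl (pvStep b) (d, pvTable s.toNat)).1
      = pvAltLoop b f s (pvP s.toNat) d := by
  intro f
  induction f with
  | zero =>
      intro s e _ he d
      have hr : PySem.List.pyRange s e 1 = [] := by
        rw [PySem.List.pyRange_one, he]
        rfl
      rw [hr]
      rfl
  | succ g ih =>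
      intro s e hs he d
      have hlt : s < e := by omega
      rw [PySem.List.pyRange_one_cons hlt, List.foldl_cons]
      have hstep : pvStep b (d, pvTable s.toNat) s
          = (d.insert (b - 2 * s) (pvP s.toNat), pvTable ((s+1).toNat)) := by
        have hsn : (s+1).toNat = s.toNat + 1 := by omega
        have ht : pvStepA (pvTable s.toNat) = pvTable (s.toNat + 1) := rfl
        have hhead : (pvTable (s.toNat + 1)).headD 0 = pvP s.toNat := by
          rw [(pvTable_succ s.toNat).1]
          rfl
        rw [pvStep, ht, hhead, hsn]
      rw [hstep, ih (s+1) e (by omega) (by omega) (d.insert (b - 2 * s) (pvP s.toNat))]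
      have halt : pvAltLoop b (g+1) s (pvP s.toNat) d
          = pvAltLoop b g (s + 1) (if 1 ≤ s then pvP s.toNat * 2 else pvP s.toNat)
              (d.insert (b - 2 * s) (pvP s.toNat)) := by
        rw [pvAltLoop]
      rw [halt, pvP_succ s hs]
      have hsn : (s+1).toNat = s.toNat + 1 := by omega
      rw [hsn]

-- ===== VERDICT (by name: the statement is the Claim_ definition above) =====
theorem prefundamental_char_sl2_py_spec : Claim_equal_prefundamental_char_sl2_py := by
  intro b depth _
  unfold Spec_prefundamental_char_sl2_py prefundamental_char_sl2_py
    prefundamental_char_sl2_py_alt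
  have h := pvAB b depth.toNat 0 depth (le_refl 0) (by omega) PySem.Dict.empty
  rw [show ([] : List Int) = pvTable ((0 : Int)).toNat from rfl, h]
  rfl
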